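-- pv_equiv track=rewrite | github.com/cstuartroe/scale-theory | src/scales/cycle_stats.py | interval_diversity
-- ===== SOURCE A (Python) =====
-- def interval_diversity(scale, important_intervals=None):
--     intervals = set()
--     for rot in range(len(scale)):
--         d = 0
--         for deg in range(len(scale)):
--             d += scale[(rot + deg) % len(scale)]
--             intervals.add(d)
--
--     if important_intervals:
--         intervals = intervals & important_intervals
--
--     return len(intervals)
-- ===== SOURCE B (Python) =====
-- def interval_diversity(scale, important_intervals=None):
--     n = len(scale)
--     prefix = [0]
--     acc = 0
--     for x in scale + scale:
--         acc += x
--         prefix.append(acc)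
--     intervals = {prefix[i + L] - prefix[i] for i in range(n) for L in range(1, n + 1)}
--     if important_intervals:
--         intervals &= important_intervals
--     return len(intervals)
-- ===== Notes on version B (the rewrite author's own statement) =====
-- stated objective: alternative
-- what changed: Replaces the per-rotation restarted accumulator with a prefix-sum table over the doubled scale, so each arc sum is a single subtraction prefix[i+L]-prefix[i] collected by a set comprehension.
import Mathlib
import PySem

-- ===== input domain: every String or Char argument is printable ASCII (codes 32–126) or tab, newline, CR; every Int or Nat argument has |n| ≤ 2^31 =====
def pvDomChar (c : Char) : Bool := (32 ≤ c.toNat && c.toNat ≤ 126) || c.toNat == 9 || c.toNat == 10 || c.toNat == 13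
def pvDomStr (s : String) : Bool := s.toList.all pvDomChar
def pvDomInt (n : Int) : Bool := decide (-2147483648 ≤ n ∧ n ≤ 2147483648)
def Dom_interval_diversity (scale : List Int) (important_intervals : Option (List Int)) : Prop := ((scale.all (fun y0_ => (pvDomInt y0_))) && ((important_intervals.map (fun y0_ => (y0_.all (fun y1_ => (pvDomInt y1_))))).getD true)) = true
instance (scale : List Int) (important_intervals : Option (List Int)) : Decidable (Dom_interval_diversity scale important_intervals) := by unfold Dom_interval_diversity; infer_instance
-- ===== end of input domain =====

-- B replaces A's per-rotation restarted accumulator with a prefix-sum table over the doubled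
-- scale, collecting each arc sum as a single subtraction (same O(n^2) cost, different decomposition).

-- ===== PORT A =====
-- scale[(rot + deg) % len(scale)]: the index is a Python mod by len(scale) > 0 whenever the
-- loops run, so it is always in range; pyGetD is exact here.
def interval_diversity (scale : List Int) (important_intervals : Option (List Int)) : Int :=
  let n : Int := scale.length
  let intervals : PySem.Set Int :=
    (PySem.List.pyRange 0 n).foldl
      (fun acc rot =>
        ((PySem.List.pyRange 0 n).foldl
          (fun (st : Int × PySem.Set Int) deg =>
            let d := st.1 + PySem.List.pyGetD scale (PySem.Int.mod (rot + deg) n) 0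
            (d, st.2.add d))
          ((0 : Int), acc)).2)
      PySem.Set.empty
  let intervals2 : PySem.Set Int :=
    match important_intervals with
    | none => intervals
    | some l => if l = [] then intervals else PySem.Set.inter intervals l
  PySem.Set.len intervals2

-- ===== PORT B =====
-- prefix[i + L] and pref[i]: 0 <= i, i + L <= 2n < len(pref), always in range; pyGetD is exact here.
def interval_diversity_alt (scale : List Int) (important_intervals : Option (List Int)) : Int :=
  let n : Int := scale.length
  let pref : List Int :=
    ((scale ++ scale).foldl
      (fun (st : Int × List Int) x =>
        let acc := st.1 + x
        (acc, st.2 ++ [acc]))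
      ((0 : Int), ([0] : List Int))).2
  let intervals : PySem.Set Int :=
    PySem.Set.ofList
      ((PySem.List.pyRange 0 n).flatMap (fun i =>
        (PySem.List.pyRange 1 (n + 1)).map (fun L =>
          PySem.List.pyGetD pref (i + L) 0 - PySem.List.pyGetD pref i 0)))
  let intervals2 : PySem.Set Int :=
    match important_intervals with
    | none => intervals
    | some l => if l = [] then intervals else PySem.Set.inter intervals l
  PySem.Set.len intervals2

-- ===== PRECONDITION & SPEC =====
def Spec_interval_diversity (scale : List Int) (important_intervals : Option (List Int)) (out : Int) : Prop := out = interval_diversity_alt scale important_intervals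
instance (scale : List Int) (important_intervals : Option (List Int)) (out : Int) : Decidable (Spec_interval_diversity scale important_intervals out) := by unfold Spec_interval_diversity; infer_instance

-- ===== CLAIM (what is proved, stated in full; the proofs are below) =====
def Claim_equal_interval_diversity : Prop := ∀ (scale : List Int) (important_intervals : Option (List Int)), Dom_interval_diversity scale important_intervals → Spec_interval_diversity scale important_intervals (interval_diversity scale important_intervals)

-- ===== LEMMAS AND PROOFS =====

-- prefix sums of the doubled scale
def pvPsum (scale : List Int) (m : Nat) : Int := ((scale ++ scale).take m).sum

-- the common characterisation: x is the sum of some contiguous cyclic arc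
def pvArc (scale : List Int) (x : Int) : Prop :=
  ∃ i L : Nat, i < scale.length ∧ 1 ≤ L ∧ L ≤ scale.length ∧
    x = pvPsum scale (i + L) - pvPsum scale i

-- running partial sums d0 + f x1, d0 + f x1 + f x2, …
def pvScan (f : Int → Int) : List Int → Int → List Int
  | [], _ => []
  | x :: t, d0 => (d0 + f x) :: pvScan f t (d0 + f x)

lemma pvScan_eq_map (f : Int → Int) : ∀ (l : List Int) (d0 : Int),
    pvScan f l d0 = (List.range l.length).map (fun k => d0 + ((l.take (k + 1)).map f).sum)
  | [], _ => rfl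
  | x :: t, d0 => by
    simp only [pvScan, pvScan_eq_map f t (d0 + f x), List.length_cons,
      List.range_succ_eq_map, List.map_cons, List.map_map]
    refine List.cons_eq_cons.mpr ⟨by simp, ?_⟩
    apply List.map_congr_left
    intro k _
    simp [Nat.succ_eq_add_one, List.take_succ_cons, add_assoc]

lemma pvFoldl_add_snd (f : Int → Int) : ∀ (l : List Int) (d0 : Int) (s : PySem.Set Int),
    (l.foldl (fun (st : Int × PySem.Set Int) x => (st.1 + f x, st.2.add (st.1 + f x))) (d0, s)).2
      = (pvScan f l d0).foldl PySem.Set.add s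
  | [], _, _ => rfl
  | x :: t, d0, s => by
    simp only [List.foldl_cons, pvScan, pvFoldl_add_snd f t (d0 + f x) (s.add (d0 + f x))]

lemma pvOuter_eq (rng : List Int) (f : Int → Int → Int) :
    ∀ (l : List Int) (init : PySem.Set Int),
    l.foldl (fun acc rot =>
        ((rng.foldl (fun (st : Int × PySem.Set Int) deg =>
            (st.1 + f rot deg, st.2.add (st.1 + f rot deg))) ((0 : Int), acc)).2)) init
      = (l.flatMap (fun rot => pvScan (f rot) rng 0)).foldl PySem.Set.add init
  | [], _ => rfl
  | rot :: t, init => by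
    simp only [List.foldl_cons, List.flatMap_cons, List.foldl_append,
      pvFoldl_add_snd (f rot) rng 0 init, pvOuter_eq rng f t]

lemma pvExt_getD (scale : List Int) (j : Nat) (h : j < 2 * scale.length) :
    (scale ++ scale).getD j 0 = scale.getD (j % scale.length) 0 := by
  have hn : 0 < scale.length := by omega
  have hm : j % scale.length < scale.length := Nat.mod_lt _ hn
  have hlen : j < (scale ++ scale).length := by simp only [List.length_append]; omega
  rcases Nat.lt_or_ge j scale.length with hj | hj
  · rw [List.getD_eq_getElem _ _ hlen, List.getD_eq_getElem _ _ hm,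
      List.getElem_append_left hj]
    congr 1
    exact (Nat.mod_eq_of_lt hj).symm
  · have hsub : j % scale.length = j - scale.length := by
      rw [Nat.mod_eq_sub_mod hj, Nat.mod_eq_of_lt (by omega)]
    rw [List.getD_eq_getElem _ _ hlen, List.getD_eq_getElem _ _ hm,
      List.getElem_append_right hj]
    congr 1
    omega

lemma pvPsum_succ (scale : List Int) (j : Nat) (h : j < 2 * scale.length) :
    pvPsum scale (j + 1) = pvPsum scale j + scale.getD (j % scale.length) 0 := by
  have hl : j < (scale ++ scale).length := by simp; omega
  rw [pvPsum, pvPsum, List.sum_take_succ _ _ hl, ← pvExt_getD scale j h,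
    List.getD_eq_getElem _ _ hl]

lemma pvArith (scale : List Int) (r k : Nat) (hr : r < scale.length) (hk : k < scale.length) :
    ((List.range (k + 1)).map (fun j => scale.getD ((r + j) % scale.length) 0)).sum
      = pvPsum scale (r + (k + 1)) - pvPsum scale r := by
  induction k with
  | zero =>
    simp [pvPsum_succ scale r (by omega)]
  | succ k ih =>
    have ih' := ih (by omega)
    rw [List.range_succ, List.map_append, List.sum_append]
    have h1 : r + (k + 1) < 2 * scale.length := by omega
    have h2 := pvPsum_succ scale (r + (k + 1)) h1
    have hre : r + (k + 1 + 1) = r + (k + 1) + 1 := by omega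
    rw [hre]
    simp only [List.map_cons, List.map_nil, List.sum_cons, List.sum_nil] at *
    omega

-- the inner-loop partial sum that A's rotation r reaches after k+1 additions, as a prefix difference
lemma pvA_elem (scale : List Int) (r k : Nat) (hr : r < scale.length) (hk : k < scale.length) :
    0 + (((PySem.List.pyRange 0 (scale.length : Int)).take (k + 1)).map
        (fun deg => PySem.List.pyGetD scale (PySem.Int.mod ((r : Int) + deg) (scale.length : Int)) 0)).sum
      = pvPsum scale (r + (k + 1)) - pvPsum scale r := by
  rw [PySem.List.pyRange_zero_natCast, ← List.map_take, List.take_range,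
    Nat.min_eq_left (by omega), List.map_map, zero_add]
  rw [List.map_congr_left (g := fun j => scale.getD ((r + j) % scale.length) 0) ?_]
  · exact pvArith scale r k hr hk
  · intro j hj
    simp only [Function.comp]
    rw [show (r : Int) + (j : Int) = ((r + j : Nat) : Int) by push_cast; ring,
      PySem.Int.mod_natCast, PySem.List.pyGetD_natCast]

-- the generated-value lists of the two ports have the same members: the cyclic arc sums
lemma pvMemA (scale : List Int) (x : Int) :
    (x ∈ (PySem.List.pyRange 0 (scale.length : Int)).flatMap (fun rot =>
        pvScan (fun deg =>
          PySem.List.pyGetD scale (PySem.Int.mod (rot + deg) (scale.length : Int)) 0)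
          (PySem.List.pyRange 0 (scale.length : Int)) 0)) ↔ pvArc scale x := by
  rw [List.mem_flatMap]
  constructor
  · rintro ⟨rot, hrot, hx⟩
    rw [PySem.List.pyRange_zero_natCast, List.mem_map] at hrot
    obtain ⟨r, hr, rfl⟩ := hrot
    rw [List.mem_range] at hr
    rw [pvScan_eq_map, List.mem_map] at hx
    obtain ⟨k, hk, rfl⟩ := hx
    rw [List.mem_range, PySem.List.pyRange_zero_natCast, List.length_map, List.length_range] at hk
    exact ⟨r, k + 1, hr, by omega, by omega, pvA_elem scale r k hr hk⟩
  · rintro ⟨i, L, hi, hL1, hLn, rfl⟩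
    refine ⟨(i : Int), ?_, ?_⟩
    · rw [PySem.List.pyRange_zero_natCast, List.mem_map]
      exact ⟨i, List.mem_range.mpr hi, rfl⟩
    · rw [pvScan_eq_map, List.mem_map]
      refine ⟨L - 1, ?_, ?_⟩
      · rw [List.mem_range, PySem.List.pyRange_zero_natCast, List.length_map, List.length_range]
        omega
      · rw [show L - 1 + 1 = L by omega]
        have h := pvA_elem scale i (L - 1) hi (by omega)
        rw [show L - 1 + 1 = L by omega] at h
        exact h

lemma pvMemB (scale : List Int) (x : Int) :
    (x ∈ (PySem.List.pyRange 0 (scale.length : Int)).flatMap (fun i =>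
        (PySem.List.pyRange 1 ((scale.length : Int) + 1)).map (fun L =>
          PySem.List.pyGetD ((List.range (2 * scale.length + 1)).map (pvPsum scale)) (i + L) 0
            - PySem.List.pyGetD ((List.range (2 * scale.length + 1)).map (pvPsum scale)) i 0)))
      ↔ pvArc scale x := by
  rw [List.mem_flatMap]
  constructor
  · rintro ⟨i0, hi0, hx⟩
    rw [PySem.List.pyRange_zero_natCast, List.mem_map] at hi0
    obtain ⟨i, hi, rfl⟩ := hi0
    rw [List.mem_range] at hi
    rw [List.mem_map] at hx
    obtain ⟨L0, hL0, rfl⟩ := hx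
    rw [PySem.List.mem_pyRange_one] at hL0
    refine ⟨i, L0.toNat, hi, by omega, by omega, ?_⟩
    rw [show (i : Int) + L0 = ((i + L0.toNat : Nat) : Int) by push_cast; omega,
      PySem.List.pyGetD_natCast, PySem.List.pyGetD_natCast,
      PySem.List.getD_map_range _ _ _ _ (by omega), PySem.List.getD_map_range _ _ _ _ (by omega)]
  · rintro ⟨i, L, hi, hL1, hLn, rfl⟩
    refine ⟨(i : Int), ?_, ?_⟩
    · rw [PySem.List.pyRange_zero_natCast, List.mem_map]
      exact ⟨i, List.mem_range.mpr hi, rfl⟩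
    · rw [List.mem_map]
      refine ⟨(L : Int), PySem.List.mem_pyRange_one.mpr ⟨by omega, by omega⟩, ?_⟩
      rw [show (i : Int) + (L : Int) = ((i + L : Nat) : Int) by push_cast; ring,
        PySem.List.pyGetD_natCast, PySem.List.pyGetD_natCast,
        PySem.List.getD_map_range _ _ _ _ (by omega), PySem.List.getD_map_range _ _ _ _ (by omega)]

lemma pvFoldl_append_snd : ∀ (xs : List Int) (a : Int) (acc : List Int),
    (xs.foldl (fun (st : Int × List Int) x => (st.1 + x, st.2 ++ [st.1 + x])) (a, acc)).2
      = acc ++ pvScan (fun y => y) xs a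
  | [], _, _ => by simp [pvScan]
  | x :: t, a, acc => by
    simp only [List.foldl_cons, pvScan, pvFoldl_append_snd t (a + x) (acc ++ [a + x]),
      List.append_assoc, List.cons_append, List.nil_append]

-- B's prefix list is the table of prefix sums
lemma pvPref_eq (scale : List Int) :
    ((scale ++ scale).foldl (fun (st : Int × List Int) x => (st.1 + x, st.2 ++ [st.1 + x]))
        ((0 : Int), ([0] : List Int))).2
      = (List.range (2 * scale.length + 1)).map (pvPsum scale) := by
  rw [pvFoldl_append_snd, pvScan_eq_map]
  have hlen : (scale ++ scale).length = 2 * scale.length := by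
    simp only [List.length_append]; omega
  rw [hlen, List.range_succ_eq_map, List.map_cons, List.map_map]
  rw [List.singleton_append]
  congr 1
  apply List.map_congr_left
  intro k _
  simp [pvPsum, Function.comp, Nat.succ_eq_add_one, List.map_id']

lemma pvSetsPerm (scale : List Int) :
    ∀ (sA sB : PySem.Set Int), sA.Nodup → sB.Nodup →
      (∀ x, x ∈ sA ↔ pvArc scale x) → (∀ x, x ∈ sB ↔ pvArc scale x) → sA.Perm sB := by
  intro sA sB hA hB hmA hmB
  exact (List.perm_ext_iff_of_nodup hA hB).2 (fun x => (hmA x).trans (hmB x).symm)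

lemma pvLen_eq_of_perm (s t : PySem.Set Int) (h : s.Perm t) :
    PySem.Set.len s = PySem.Set.len t := by
  simp [PySem.Set.len, h.length_eq]

lemma pvLenInter_eq_of_perm (s t : PySem.Set Int) (l : List Int) (h : s.Perm t) :
    PySem.Set.len (PySem.Set.inter s l) = PySem.Set.len (PySem.Set.inter t l) := by
  simp [PySem.Set.len, PySem.Set.inter, (h.filter _).length_eq]

-- ===== VERDICT (by name: the statement is the Claim_ definition above) =====
theorem interval_diversity_spec : Claim_equal_interval_diversity := by
  intro scale imp _dom
  unfold Spec_interval_diversity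
  simp only [interval_diversity, interval_diversity_alt]
  rw [pvOuter_eq (PySem.List.pyRange 0 (scale.length : Int))
      (fun rot deg => PySem.List.pyGetD scale (PySem.Int.mod (rot + deg) (scale.length : Int)) 0),
    pvPref_eq]
  rw [show (PySem.Set.empty : PySem.Set Int) = ([] : PySem.Set Int) from rfl,
    ← PySem.Set.ofList_eq_foldl]
  have hperm := pvSetsPerm scale _ _
    (PySem.Set.nodup_ofList _) (PySem.Set.nodup_ofList _)
    (fun x => (PySem.Set.mem_ofList _ x).trans (pvMemA scale x))
    (fun x => (PySem.Set.mem_ofList _ x).trans (pvMemB scale x))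
  cases imp with
  | none => exact pvLen_eq_of_perm _ _ hperm
  | some l =>
    by_cases hl : l = []
    · simp only [hl]
      exact pvLen_eq_of_perm _ _ hperm
    · simp only [if_neg hl]
      exact pvLenInter_eq_of_perm _ _ l hperm
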